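-- pv_equiv track=rewrite | github.com/DancingOnAir/LeetcodePythonSolution | string/1487_making_file_names_unique.py | getFolderNames2
-- ===== SOURCE A (Python) =====
-- from typing import List
-- from collections import defaultdict
--
-- def getFolderNames2(names: List[str]) -> List[str]:
--     res = list()
--     memo = set()
--     last = defaultdict(int)
--
--     for name in names:
--         v = last[name]
--         modified = name
--         while modified in memo:
--             v += 1
--             modified = f'{name}({v})'
--
--         last[name] = v
--         memo.add(modified)
--         res.append(modified)
--
--     return res
-- ===== SOURCE B (Python) =====
-- from typing import List
--
-- def getFolderNames2(names: List[str]) -> List[str]: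
--     res = []
--     for name in names:
--         for c in [name] + [f'{name}({k})' for k in range(1, len(res) + 1)]:
--             if c not in res:
--                 res.append(c)
--                 break
--     return res
-- ===== Notes on version B (the rewrite author's own statement) =====
-- stated objective: simpler
-- what changed: A keeps a used-set plus a cached per-name counter dict and resumes the while-probe from the cache; B keeps only the result list itself, materialises the len(res)+1 candidates name, name(1), ..., name(len(res)) up front and appends the first one not already in the result - one list, no set, no dict, no while loop.
import Mathlib
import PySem

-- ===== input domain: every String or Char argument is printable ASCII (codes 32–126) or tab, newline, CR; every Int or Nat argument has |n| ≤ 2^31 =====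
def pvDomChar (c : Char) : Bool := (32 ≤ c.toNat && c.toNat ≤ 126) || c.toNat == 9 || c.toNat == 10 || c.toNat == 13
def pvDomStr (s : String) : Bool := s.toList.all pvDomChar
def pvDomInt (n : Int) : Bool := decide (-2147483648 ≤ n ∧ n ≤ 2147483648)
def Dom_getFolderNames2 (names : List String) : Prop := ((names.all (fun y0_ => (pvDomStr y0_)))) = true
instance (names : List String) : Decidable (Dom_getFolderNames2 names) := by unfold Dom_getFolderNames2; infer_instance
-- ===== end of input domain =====

-- B replaces A's set + cached-counter dict by a single result list: for each name it
-- materialises the len(res)+1 candidates name, name(1), …, name(len(res)) up front and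
-- appends the first one not already in the result — simpler (one list, no dict, no while).

-- ===== PORT A =====
-- A's while-loop 'while modified in memo: v += 1; modified = f"{name}({v})"' on state (v, modified).
-- The fuel argument only makes the recursion structural: fuel = memo.length + 1 always suffices
-- at the call site (the probed candidates are pairwise distinct), so the 0-fuel branch is dead.
def probeA (memo : PySem.Set String) (name : String) : Nat → Int → String → Int × String
  | 0, v, modified => (v, modified)
  | fuel + 1, v, modified =>
      if PySem.Set.contains memo modified then
        probeA memo name fuel (v + 1) (name ++ "(" ++ PySem.Int.toStr (v + 1) ++ ")")
      else (v, modified)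

-- A's for-loop over names, state (res, memo, last).  'v = last[name]' is ported as getD name 0
-- (the defaultdict also inserts the key with value 0, but 'last' is never returned and in the same
-- iteration 'last[name] = v' overwrites that entry, so only the looked-up VALUE is observable).
def loopA : List String → List String → PySem.Set String → PySem.Dict String Int → List String
  | [], res, _, _ => res
  | name :: rest, res, memo, last =>
      let v := PySem.Dict.getD last name 0
      let p := probeA memo name (memo.length + 1) v name
      loopA rest (res ++ [p.2]) (PySem.Set.add memo p.2) (PySem.Dict.insert last name p.1)

def getFolderNames2 (names : List String) : List String :=
  loopA names [] PySem.Set.empty PySem.Dict.empty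

-- ===== PORT B =====
-- the candidate list '[name] + [f"{name}({k})" for k in range(1, len(res) + 1)]'
def candsB (res : List String) (name : String) : List String :=
  [name] ++ (PySem.List.pyRange 1 ((res.length : Int) + 1) 1).map
              (fun k => name ++ "(" ++ PySem.Int.toStr k ++ ")")

-- the inner 'for c in …: if c not in res: … break' — first candidate not in res, if any
def pickB (res : List String) : List String → Option String
  | [] => none
  | c :: cs => if c ∈ res then pickB res cs else some c

-- B's outer loop: result list only; no break ⇒ nothing appended (unreachable in fact)
def loopB : List String → List String → List String
  | [], res => res
  | name :: rest, res =>
      match pickB res (candsB res name) with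
      | some c => loopB rest (res ++ [c])
      | none => loopB rest res

def getFolderNames2_alt (names : List String) : List String :=
  loopB names []

-- ===== PRECONDITION & SPEC =====
def Spec_getFolderNames2 (names : List String) (out : List String) : Prop := out = getFolderNames2_alt names
instance (names : List String) (out : List String) : Decidable (Spec_getFolderNames2 names out) := by unfold Spec_getFolderNames2; infer_instance

-- ===== CLAIM =====
def Claim_equal_getFolderNames2 : Prop := ∀ (names : List String), Dom_getFolderNames2 names → Spec_getFolderNames2 names (getFolderNames2 names)

-- ===== LEMMAS AND PROOFS =====

lemma toDigitsCore_eq_digits : ∀ (f n : Nat) (acc : List Char), 0 < n → n < f →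
    Nat.toDigitsCore 10 f n acc = ((Nat.digits 10 n).map Nat.digitChar).reverse ++ acc := by
  intro f
  induction f with
  | zero => intro n acc h1 h2; omega
  | succ f ih =>
      intro n acc h1 h2
      rw [Nat.toDigitsCore]
      rw [Nat.digits_def' (by norm_num : 1 < 10) h1]
      by_cases hz : n / 10 = 0
      · simp [hz]
      · have hp : 0 < n / 10 := Nat.pos_of_ne_zero hz
        have hf : n / 10 < f := by
          have := Nat.div_lt_self h1 (by norm_num : 1 < 10)
          omega
        simp only [hz, if_false]
        rw [ih (n / 10) _ hp hf]
        simp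

lemma toDigits_injOn_pos {m n : Nat} (hm : 0 < m) (hn : 0 < n)
    (h : Nat.toDigits 10 m = Nat.toDigits 10 n) : m = n := by
  unfold Nat.toDigits at h
  rw [toDigitsCore_eq_digits (m+1) m [] hm (by omega),
      toDigitsCore_eq_digits (n+1) n [] hn (by omega)] at h
  simp only [List.append_nil] at h
  have h2 : (Nat.digits 10 m).map Nat.digitChar = (Nat.digits 10 n).map Nat.digitChar :=
    List.reverse_injective h
  have hdc : ∀ a < 10, ∀ b < 10, Nat.digitChar a = Nat.digitChar b → a = b := by decide
  have hdig : Nat.digits 10 m = Nat.digits 10 n := by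
    have hlen : (Nat.digits 10 m).length = (Nat.digits 10 n).length := by
      have := congrArg List.length h2; simpa using this
    apply List.ext_getElem hlen
    intro i hi1 hi2
    have := congrArg (fun l => l[i]?) h2
    simp only [List.getElem?_map] at this
    rw [List.getElem?_eq_getElem hi1, List.getElem?_eq_getElem hi2] at this
    simp only [Option.map_some] at this
    exact hdc _ (Nat.digits_lt_base (by norm_num) (List.getElem_mem _))
          _ (Nat.digits_lt_base (by norm_num) (List.getElem_mem _)) (Option.some.inj this)
  exact Nat.digits.injective 10 hdig

def candN (name : String) (k : Nat) : String :=
  if k = 0 then name else name ++ "(" ++ PySem.Int.toStr (k : Int) ++ ")"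

lemma toStr_nat (k : Nat) : PySem.Int.toStr (k : Int) = String.ofList (Nat.toDigits 10 k) := by
  simp [PySem.Int.toStr, PySem.Int.toChars, show ¬((k:Int) < 0) by omega]

lemma candN_pos_toList (name : String) {k : Nat} (hk : k ≠ 0) :
    (candN name k).toList = name.toList ++ '(' :: (Nat.toDigits 10 k ++ [')']) := by
  simp [candN, hk, toStr_nat, String.toList_append]

lemma candN_inj (name : String) : Function.Injective (candN name) := by
  intro j k h
  by_cases hj : j = 0 <;> by_cases hk : k = 0
  · omega
  · exfalso
    have h1 := congrArg String.toList h
    rw [candN_pos_toList name hk] at h1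
    simp only [candN, hj, if_pos] at h1
    have := congrArg List.length h1
    simp at this
  · exfalso
    have h1 := congrArg String.toList h
    rw [candN_pos_toList name hj] at h1
    simp only [candN, hk, if_pos] at h1
    have := congrArg List.length h1
    simp at this
  · have h1 := congrArg String.toList h
    rw [candN_pos_toList name hj, candN_pos_toList name hk] at h1
    have h2 := List.append_cancel_left h1
    have h3 : (Nat.toDigits 10 j ++ [')'] : List Char) = Nat.toDigits 10 k ++ [')'] :=
      List.cons_injective h2
    have h4 : Nat.toDigits 10 j = Nat.toDigits 10 k := List.append_cancel_right h3
    exact toDigits_injOn_pos (Nat.pos_of_ne_zero hj) (Nat.pos_of_ne_zero hk)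
      (by simpa [Nat.toDigits] using h4)

lemma exists_free (res : List String) (name : String) :
    ∃ k, k ≤ res.length ∧ candN name k ∉ res := by
  by_contra hc
  push Not at hc
  have hsub : ((List.range (res.length + 1)).map (candN name)) ⊆ res := by
    intro x hx
    rcases List.mem_map.mp hx with ⟨k, hk, rfl⟩
    exact hc k (by simpa using Nat.lt_succ_iff.mp (List.mem_range.mp hk))
  have hndL : ((List.range (res.length + 1)).map (candN name)).Nodup :=
    (List.nodup_range).map (candN_inj name)
  have := (List.subperm_of_subset hndL hsub).length_le
  simp at this

lemma pickB_eq_find? (res : List String) : ∀ l, pickB res l = l.find? (fun c => decide (c ∉ res)) := by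
  intro l
  induction l with
  | nil => rfl
  | cons c cs ih =>
      rw [pickB, List.find?_cons]
      by_cases h : c ∈ res <;> simp [h, ih]

lemma candsB_eq (res : List String) (name : String) :
    candsB res name = (List.range (res.length + 1)).map (candN name) := by
  unfold candsB
  rw [PySem.List.pyRange_one, List.range_succ_eq_map]
  have h2 : ((res.length:Int) + 1 - 1).toNat = res.length := by omega
  rw [h2]
  simp only [List.map_cons, List.map_map, List.singleton_append]
  refine congrArg₂ List.cons ?_ ?_
  · simp [candN]
  · apply List.map_congr_left
    intro k hk
    simp only [List.mem_range] at hk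
    show name ++ "(" ++ PySem.Int.toStr (1 + (k:Int)) ++ ")" = candN name (k+1)
    rw [candN]
    have h1 : ((1:Int) + (k:Int)) = ((k+1 : Nat) : Int) := by push_cast; ring
    rw [h1]
    simp

lemma pickB_result (res : List String) (name : String) (u : Nat)
    (hle : u ≤ res.length) (hfree : candN name u ∉ res)
    (hmin : ∀ s, s < u → candN name s ∈ res) :
    pickB res (candsB res name) = some (candN name u) := by
  rw [pickB_eq_find?, candsB_eq]
  have hsplit : res.length + 1 = u + (res.length - u + 1) := by omega
  rw [hsplit, List.range_add, List.map_append, List.find?_append]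
  have h1 : List.find? (fun c => decide (c ∉ res)) ((List.range u).map (candN name)) = none := by
    apply List.find?_eq_none.mpr
    intro x hx
    rcases List.mem_map.mp hx with ⟨s, hs, rfl⟩
    simp [hmin s (List.mem_range.mp hs)]
  rw [h1, Option.none_or]
  rw [List.range_succ_eq_map]
  simp only [List.map_cons, List.map_map, List.find?_cons]
  simp only [Nat.add_zero]
  rw [decide_eq_true (by exact hfree)]

lemma probeA_aligned (res : List String) (name : String) :
    ∀ (fuel w t : Nat), 1 ≤ w →
    (∀ s, s < t → candN name (w + s) ∈ res) → candN name (w + t) ∉ res → t < fuel →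
    probeA res name fuel (w : Int) (candN name w) = (((w + t : Nat) : Int), candN name (w + t)) := by
  intro fuel
  induction fuel with
  | zero => intro w t _ _ _ h; omega
  | succ f ih =>
      intro w t hw hmem hfree hlt
      rw [probeA]
      by_cases hin : candN name w ∈ res
      · have ht : t ≠ 0 := by
          intro h; subst h; simp only [Nat.add_zero] at hfree; exact hfree hin
        rw [if_pos (PySem.Set.contains_iff _ _ |>.mpr hin)]
        have hcast : ((w : Int) + 1) = ((w + 1 : Nat) : Int) := by push_cast; ring
        rw [hcast]
        have hcand : name ++ "(" ++ PySem.Int.toStr ((w + 1 : Nat) : Int) ++ ")" = candN name (w + 1) := by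
          rw [candN, if_neg (by omega)]
        rw [hcand]
        have := ih (w + 1) (t - 1) (by omega)
          (fun s hs => by
            have := hmem (s + 1) (by omega)
            simpa [Nat.add_assoc, Nat.add_comm 1 s] using this)
          (by
            have h2 : w + 1 + (t - 1) = w + t := by omega
            rw [h2]; exact hfree)
          (by omega)
        rw [this]
        have h2 : w + 1 + (t - 1) = w + t := by omega
        rw [h2]
      · have ht : t = 0 := by
          by_contra h
          exact hin (by simpa using hmem 0 (by omega))
        subst ht
        rw [if_neg (by simp [hin])]
        simp

def StInv (res : List String) (last : PySem.Dict String Int) : Prop :=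
  ∀ name : String,
    0 ≤ PySem.Dict.getD last name 0 ∧
    ((1 : Int) ≤ PySem.Dict.getD last name 0 → name ∈ res) ∧
    (∀ k : Nat, 1 ≤ k → (k : Int) ≤ PySem.Dict.getD last name 0 → candN name k ∈ res)

lemma candN_zero (name : String) : candN name 0 = name := by simp [candN]

lemma append_singleton_nodup {res : List String} {c : String} (hnd : res.Nodup) (hc : c ∉ res) :
    (res ++ [c]).Nodup := by
  rw [← List.concat_eq_append]
  exact hnd.concat hc

lemma set_add_fresh (res : List String) (c : String) (hc : c ∉ res) :
    PySem.Set.add res c = res ++ [c] := by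
  simp [PySem.Set.add, PySem.Set.contains, hc]

lemma stinv_step (res : List String) (last : PySem.Dict String Int) (name : String) (u : Nat)
    (hinv : StInv res last)
    (humin : ∀ s, s < u → candN name s ∈ res) :
    StInv (res ++ [candN name u]) (PySem.Dict.insert last name (u : Int)) := by
  intro n'
  by_cases hn : n' = name
  · subst hn
    rw [PySem.Dict.getD_insert_self]
    refine ⟨Int.natCast_nonneg u, ?_, ?_⟩
    · intro h1
      have hu : 1 ≤ u := by exact_mod_cast h1
      exact List.mem_append_left _ (by simpa [candN_zero] using humin 0 (by omega))
    · intro k hk hle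
      have hku : k ≤ u := by exact_mod_cast hle
      rcases Nat.lt_or_ge k u with h | h
      · exact List.mem_append_left _ (humin k h)
      · have : k = u := by omega
        subst this
        exact List.mem_append_right _ (List.mem_singleton_self _)
  · rw [PySem.Dict.getD_insert, if_neg hn]
    obtain ⟨a, b, c⟩ := hinv n'
    exact ⟨a, fun h => List.mem_append_left _ (b h),
           fun k hk hle => List.mem_append_left _ (c k hk hle)⟩

lemma loopA_eq_loopB (names : List String) :
    ∀ (res : List String) (last : PySem.Dict String Int),
    res.Nodup → StInv res last → loopA names res res last = loopB names res := by
  induction names with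
  | nil => intro res last _ _; rfl
  | cons name rest ih =>
      intro res last hnd hinv
      rw [loopA, loopB]
      obtain ⟨h0, h1, h2⟩ := hinv name
      obtain ⟨kk, hkk, hfreek⟩ := exists_free res name
      have hex : ∃ k, candN name k ∉ res := ⟨kk, hfreek⟩
      set u := Nat.find hex with hu
      have hufree : candN name u ∉ res := Nat.find_spec hex
      have humin : ∀ s, s < u → candN name s ∈ res := by
        intro s hs
        have := Nat.find_min hex hs
        simpa using this
      have hule : u ≤ res.length := le_trans (Nat.find_min' hex hfreek) hkk
      rw [pickB_result res name u hule hufree humin]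
      by_cases hname : name ∈ res
      · -- name taken: probeA walks from the cached counter to candN u
        have hlen1 : 1 ≤ res.length := List.length_pos_of_mem hname
        have hv0 : ∀ s : Nat, s ≤ (PySem.Dict.getD last name 0).toNat → candN name s ∈ res := by
          intro s hs
          rcases Nat.eq_zero_or_pos s with h | h
          · subst h; simpa [candN_zero] using hname
          · exact h2 s h (by omega)
        have huv0 : (PySem.Dict.getD last name 0).toNat < u := by
          by_contra h
          exact hufree (hv0 u (by omega))
        have hw : (PySem.Dict.getD last name 0) + 1 = (((PySem.Dict.getD last name 0).toNat + 1 : Nat) : Int) := by omega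
        have hprobe : probeA res name (res.length + 1) (PySem.Dict.getD last name 0) name
            = ((u : Int), candN name u) := by
          rw [probeA, if_pos ((PySem.Set.contains_iff _ _).mpr hname)]
          rw [hw]
          set w := (PySem.Dict.getD last name 0).toNat + 1 with hwdef
          have hcand : name ++ "(" ++ PySem.Int.toStr ((w : Nat) : Int) ++ ")" = candN name w := by
            rw [candN, if_neg (by omega)]
          rw [hcand]
          have := probeA_aligned res name res.length w (u - w) (by omega)
            (fun s hs => humin (w + s) (by omega))
            (by rw [Nat.add_sub_cancel' (by omega)]; exact hufree)
            (by omega)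
          rw [this, Nat.add_sub_cancel' (by omega)]
        simp only [hprobe]
        rw [set_add_fresh res _ hufree]
        apply ih
        · exact append_singleton_nodup hnd hufree
        · exact stinv_step res last name u hinv humin
      · -- name free: probeA returns immediately and u = 0
        have hu0 : u = 0 := by
          have := Nat.find_min' hex (by rw [candN_zero]; exact hname)
          omega
        have hprobe : probeA res name (res.length + 1) (PySem.Dict.getD last name 0) name
            = (PySem.Dict.getD last name 0, name) := by
          rw [probeA, if_neg (by simp [PySem.Set.contains, hname])]
        simp only [hprobe, hu0, candN_zero]
        rw [set_add_fresh res _ hname]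
        apply ih
        · exact append_singleton_nodup hnd hname
        · have : StInv (res ++ [name]) (PySem.Dict.insert last name (PySem.Dict.getD last name 0)) := by
            intro n'
            by_cases hn : n' = name
            · subst hn
              rw [PySem.Dict.getD_insert_self]
              exact ⟨h0, fun _ => List.mem_append_right _ (List.mem_singleton_self _),
                     fun k hk hle => List.mem_append_left _ (h2 k hk hle)⟩
            · rw [PySem.Dict.getD_insert, if_neg hn]
              obtain ⟨a, b, c⟩ := hinv n'
              exact ⟨a, fun h => List.mem_append_left _ (b h),
                     fun k hk hle => List.mem_append_left _ (c k hk hle)⟩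
          exact this

theorem getFolderNames2_eq (names : List String) :
    getFolderNames2 names = getFolderNames2_alt names := by
  unfold getFolderNames2 getFolderNames2_alt
  apply loopA_eq_loopB
  · exact List.nodup_nil
  · intro name
    refine ⟨by simp [PySem.Dict.getD_empty], by simp [PySem.Dict.getD_empty], ?_⟩
    intro k hk hle
    simp [PySem.Dict.getD_empty] at hle
    omega

-- ===== VERDICT =====
theorem getFolderNames2_spec : Claim_equal_getFolderNames2 := by
  intro names _
  unfold Spec_getFolderNames2
  exact getFolderNames2_eq names
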